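-- pv_equiv track=rewrite | github.com/Astharen/Factories-PygameBoardGame | Scripts/AI.py | buying_a_factory
-- ===== SOURCE A (Python) =====
-- def buying_a_factory(board_size, turn, list_color_map, factory, factory_price, cash, current_profit, factory_profit, list_property, wood):
--     bought_factory = False
--     for y_prop in range(board_size[1]):
--         for x_prop in range(board_size[0]):
--             if list_property[y_prop][x_prop] == str(turn) and not bought_factory and list_color_map[y_prop][x_prop]=='0':
--                 list_color_map[y_prop][x_prop] = '2'
--                 cash[str(turn)] -= factory_price
--                 current_profit[str(turn)] += factory_profit
--                 factory[str(turn)] += 1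
--                 bought_factory = True
--     if not bought_factory:
--         for y_prop in range(board_size[1]):
--             for x_prop in range(board_size[0]):
--                 if list_property[y_prop][x_prop] == str(turn) and not bought_factory and list_color_map[y_prop][x_prop]=='1':
--                     list_color_map[y_prop][x_prop] = '2'
--                     cash[str(turn)] -= factory_price
--                     current_profit[str(turn)] += factory_profit
--                     factory[str(turn)] += 1
--                     bought_factory = True
--                     wood[str(turn)] -= 1
--     return list_property, list_color_map, cash, current_profit, factory, wood, bought_factory
-- ===== SOURCE B (Python) =====
-- def buying_a_factory(board_size, turn, list_color_map, factory, factory_price, cash, current_profit, factory_profit, list_property, wood):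
--     # Single scan recording the first '0'-eligible and first '1'-eligible cell,
--     # then one shared purchase step.  Mutates list_color_map and the dicts in
--     # place, like the original.
--     t = str(turn)
--     zero_pos = None
--     one_pos = None
--     for y in range(board_size[1]):
--         for x in range(board_size[0]):
--             if list_property[y][x] == t:
--                 c = list_color_map[y][x]
--                 if c == '0' and zero_pos is None:
--                     zero_pos = (y, x)
--                 elif c == '1' and one_pos is None:
--                     one_pos = (y, x)
--     pos = zero_pos if zero_pos is not None else one_pos
--     bought_factory = False
--     if pos is not None:
--         y, x = pos
--         list_color_map[y][x] = '2'
--         cash[t] -= factory_price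
--         current_profit[t] += factory_profit
--         factory[t] += 1
--         bought_factory = True
--         if zero_pos is None:
--             wood[t] -= 1
--     return list_property, list_color_map, cash, current_profit, factory, wood, bought_factory
-- ===== Notes on version B (the rewrite author's own statement) =====
-- stated objective: simpler
-- what changed: A's two duplicated buy-loops (one for color '0', one for color '1') are replaced by a single scan that records the first '0'-eligible and first '1'-eligible coordinates, followed by one shared purchase step (with the wood decrement only when no '0' cell exists).
import Mathlib
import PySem

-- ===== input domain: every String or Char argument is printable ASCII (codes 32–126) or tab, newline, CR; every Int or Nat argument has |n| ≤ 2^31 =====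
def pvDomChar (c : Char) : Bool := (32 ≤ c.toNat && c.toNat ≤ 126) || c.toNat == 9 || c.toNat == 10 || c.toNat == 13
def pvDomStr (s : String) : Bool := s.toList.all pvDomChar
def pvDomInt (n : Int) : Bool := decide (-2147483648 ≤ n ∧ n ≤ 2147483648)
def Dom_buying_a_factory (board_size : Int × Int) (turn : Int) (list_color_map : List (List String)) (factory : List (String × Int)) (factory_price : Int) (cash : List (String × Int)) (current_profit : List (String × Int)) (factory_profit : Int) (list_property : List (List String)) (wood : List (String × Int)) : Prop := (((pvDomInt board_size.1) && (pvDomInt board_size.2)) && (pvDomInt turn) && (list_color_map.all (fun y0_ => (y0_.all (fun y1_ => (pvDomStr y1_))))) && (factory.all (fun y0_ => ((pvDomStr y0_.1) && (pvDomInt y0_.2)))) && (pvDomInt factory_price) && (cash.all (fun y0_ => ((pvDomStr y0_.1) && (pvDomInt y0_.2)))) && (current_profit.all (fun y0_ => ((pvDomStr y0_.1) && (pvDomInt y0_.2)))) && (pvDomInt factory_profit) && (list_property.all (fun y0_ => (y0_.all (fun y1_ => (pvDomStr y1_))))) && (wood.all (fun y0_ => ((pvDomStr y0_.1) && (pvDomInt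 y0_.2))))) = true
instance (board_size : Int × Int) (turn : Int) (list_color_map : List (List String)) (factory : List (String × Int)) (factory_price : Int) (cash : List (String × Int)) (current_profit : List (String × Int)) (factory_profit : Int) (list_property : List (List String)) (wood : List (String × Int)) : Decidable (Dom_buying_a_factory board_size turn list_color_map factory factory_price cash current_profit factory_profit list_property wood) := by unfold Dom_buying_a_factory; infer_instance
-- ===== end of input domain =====

-- B replaces A's two duplicated buy-loops by one scan recording the first '0'- and '1'-eligible
-- cells plus a single purchase step (objective: simpler). Both Pythons mutate list_color_map and
-- the dicts in place; the equivalence proved here is about the RETURN value (which contains them).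

-- ===== PORT A =====
-- d[k] op= v on a Python dict (unique keys): update the matching entry in place.
def pvDUpd (d : List (String × Int)) (k : String) (f : Int → Int) : List (String × Int) :=
  d.map (fun p => if p.1 = k then (p.1, f p.2) else p)

-- body of A's first loop (buy on a '0' cell); state = (color_map, cash, profit, factory, wood, bought)
def pvStep1 (lprop : List (List String)) (t : String) (fp fprof : Int)
    (st : List (List String) × List (String × Int) × List (String × Int) × List (String × Int) × List (String × Int) × Bool)
    (yx : Nat × Nat) :
    List (List String) × List (String × Int) × List (String × Int) × List (String × Int) × List (String × Int) × Bool :=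
  let (cm, ca, pr, fa, wo, b) := st
  if ((lprop.getD yx.1 []).getD yx.2 "" == t) && (!b) && ((cm.getD yx.1 []).getD yx.2 "" == "0") then
    (cm.set yx.1 ((cm.getD yx.1 []).set yx.2 "2"),
     pvDUpd ca t (· - fp), pvDUpd pr t (· + fprof), pvDUpd fa t (· + 1), wo, true)
  else st

-- body of A's second loop (buy on a '1' cell, also spending wood)
def pvStep2 (lprop : List (List String)) (t : String) (fp fprof : Int)
    (st : List (List String) × List (String × Int) × List (String × Int) × List (String × Int) × List (String × Int) × Bool)
    (yx : Nat × Nat) :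
    List (List String) × List (String × Int) × List (String × Int) × List (String × Int) × List (String × Int) × Bool :=
  let (cm, ca, pr, fa, wo, b) := st
  if ((lprop.getD yx.1 []).getD yx.2 "" == t) && (!b) && ((cm.getD yx.1 []).getD yx.2 "" == "1") then
    (cm.set yx.1 ((cm.getD yx.1 []).set yx.2 "2"),
     pvDUpd ca t (· - fp), pvDUpd pr t (· + fprof), pvDUpd fa t (· + 1), pvDUpd wo t (· - 1), true)
  else st

def buying_a_factory (board_size : Int × Int) (turn : Int) (list_color_map : List (List String)) (factory : List (String × Int)) (factory_price : Int) (cash : List (String × Int)) (current_profit : List (String × Int)) (factory_profit : Int) (list_property : List (List String)) (wood : List (String × Int)) : List (List String) × List (List String) × (List (String × Int)) × (List (String × Int)) × (List (String × Int)) × (List (String × Int)) × Bool :=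
  let t := PySem.Int.toStr turn
  let H := board_size.2.toNat
  let W := board_size.1.toNat
  let s1 := (List.range H).foldl
    (fun st y => (List.range W).foldl (fun st x => pvStep1 list_property t factory_price factory_profit st (y, x)) st)
    (list_color_map, cash, current_profit, factory, wood, false)
  let s2 := if s1.2.2.2.2.2 = false then
      (List.range H).foldl
        (fun st y => (List.range W).foldl (fun st x => pvStep2 list_property t factory_price factory_profit st (y, x)) st)
        s1
    else s1
  (list_property, s2)

-- ===== PORT B =====
-- one scan step: remember the first '0'-eligible and the first '1'-eligible coordinates
def pvScanStep (lcm lprop : List (List String)) (t : String)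
    (zo : Option (Nat × Nat) × Option (Nat × Nat)) (yx : Nat × Nat) :
    Option (Nat × Nat) × Option (Nat × Nat) :=
  if (lprop.getD yx.1 []).getD yx.2 "" == t then
    let c := (lcm.getD yx.1 []).getD yx.2 ""
    if (c == "0") && zo.1.isNone then (some yx, zo.2)
    else if (c == "1") && zo.2.isNone then (zo.1, some yx)
    else zo
  else zo

def buying_a_factory_alt (board_size : Int × Int) (turn : Int) (list_color_map : List (List String)) (factory : List (String × Int)) (factory_price : Int) (cash : List (String × Int)) (current_profit : List (String × Int)) (factory_profit : Int) (list_property : List (List String)) (wood : List (String × Int)) : List (List String) × List (List String) × (List (String × Int)) × (List (String × Int)) × (List (String × Int)) × (List (String × Int)) × Bool :=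
  let t := PySem.Int.toStr turn
  let H := board_size.2.toNat
  let W := board_size.1.toNat
  let zo := (List.range H).foldl
    (fun zo y => (List.range W).foldl (fun zo x => pvScanStep list_color_map list_property t zo (y, x)) zo)
    (none, none)
  let pos := match zo.1 with | some p => some p | none => zo.2
  match pos with
  | none => (list_property, list_color_map, cash, current_profit, factory, wood, false)
  | some yx =>
      (list_property,
       list_color_map.set yx.1 ((list_color_map.getD yx.1 []).set yx.2 "2"),
       pvDUpd cash t (· - factory_price),
       pvDUpd current_profit t (· + factory_profit),
       pvDUpd factory t (· + 1),
       if zo.1 = none then pvDUpd wood t (· - 1) else wood,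
       true)

-- ===== PRECONDITION & SPEC =====
def pvElig (lprop lcm : List (List String)) (t c : String) (H W : Nat) : Bool :=
  (List.range H).any (fun y => (List.range W).any (fun x =>
    ((lprop.getD y []).getD x "" == t) && ((lcm.getD y []).getD x "" == c)))

def pvHasKey (d : List (String × Int)) (k : String) : Bool := d.any (fun p => p.1 == k)

-- Pre_ excludes inputs where Python A raises: an IndexError when a board cell it reads lies outside
-- list_property/list_color_map, or a KeyError when a purchase happens and str(turn) is missing from
-- the dicts it then updates. It slightly over-requires list_color_map to cover the whole board:
-- A happens to return when a short colour-map row is never read because the guard short-circuits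
-- (no property match there, or the purchase already happened) — see the cited excluded examples.
def Pre_buying_a_factory (board_size : Int × Int) (turn : Int) (list_color_map : List (List String)) (factory : List (String × Int)) (factory_price : Int) (cash : List (String × Int)) (current_profit : List (String × Int)) (factory_profit : Int) (list_property : List (List String)) (wood : List (String × Int)) : Prop :=
  let t := PySem.Int.toStr turn
  let H := board_size.2.toNat
  let W := board_size.1.toNat
  (0 < board_size.1 →
    H ≤ list_property.length ∧ H ≤ list_color_map.length ∧
    ∀ y ∈ List.range H, W ≤ (list_property.getD y []).length ∧ W ≤ (list_color_map.getD y []).length)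
  ∧ ((pvElig list_property list_color_map t "0" H W || pvElig list_property list_color_map t "1" H W) = true →
      pvHasKey cash t = true ∧ pvHasKey current_profit t = true ∧ pvHasKey factory t = true)
  ∧ (pvElig list_property list_color_map t "0" H W = false ∧ pvElig list_property list_color_map t "1" H W = true →
      pvHasKey wood t = true)

instance (board_size : Int × Int) (turn : Int) (list_color_map : List (List String)) (factory : List (String × Int)) (factory_price : Int) (cash : List (String × Int)) (current_profit : List (String × Int)) (factory_profit : Int) (list_property : List (List String)) (wood : List (String × Int)) : Decidable (Pre_buying_a_factory board_size turn list_color_map factory factory_price cash current_profit factory_profit list_property wood) := by unfold Pre_buying_a_factory; infer_instance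

def pvWitness_buying_a_factory : (Int × Int) × Int × List (List String) × (List (String × Int)) × Int × (List (String × Int)) × (List (String × Int)) × Int × List (List String) × (List (String × Int)) :=
  ((1, 1), 0, [["0"]], [("0", 0)], 1, [("0", 5)], [("0", 0)], 2, [["0"]], [("0", 3)])

def Spec_buying_a_factory (board_size : Int × Int) (turn : Int) (list_color_map : List (List String)) (factory : List (String × Int)) (factory_price : Int) (cash : List (String × Int)) (current_profit : List (String × Int)) (factory_profit : Int) (list_property : List (List String)) (wood : List (String × Int)) (out : List (List String) × List (List String) × (List (String × Int)) × (List (String × Int)) × (List (String × Int)) × (List (String × Int)) × Bool) : Prop := out = buying_a_factory_alt board_size turn list_color_map factory factory_price cash current_profit factory_profit list_property wood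
instance (board_size : Int × Int) (turn : Int) (list_color_map : List (List String)) (factory : List (String × Int)) (factory_price : Int) (cash : List (String × Int)) (current_profit : List (String × Int)) (factory_profit : Int) (list_property : List (List String)) (wood : List (String × Int)) (out : List (List String) × List (List String) × (List (String × Int)) × (List (String × Int)) × (List (String × Int)) × (List (String × Int)) × Bool) : Decidable (Spec_buying_a_factory board_size turn list_color_map factory factory_price cash current_profit factory_profit list_property wood out) := by
  unfold Spec_buying_a_factory
  -- default instance search gives up on this deeply nested product type; assemble DecidableEq by hand
  have i1 : DecidableEq ((List (String × Int)) × (List (String × Int)) × Bool) := inferInstance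
  have i2 : DecidableEq ((List (String × Int)) × (List (String × Int)) × (List (String × Int)) × Bool) :=
    @instDecidableEqProd _ _ _ i1
  have i3 : DecidableEq ((List (String × Int)) × (List (String × Int)) × (List (String × Int)) × (List (String × Int)) × Bool) :=
    @instDecidableEqProd _ _ _ i2
  have i4 : DecidableEq (List (List String) × (List (String × Int)) × (List (String × Int)) × (List (String × Int)) × (List (String × Int)) × Bool) :=
    @instDecidableEqProd _ _ _ i3
  have i5 : DecidableEq (List (List String) × List (List String) × (List (String × Int)) × (List (String × Int)) × (List (String × Int)) × (List (String × Int)) × Bool) :=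
    @instDecidableEqProd _ _ _ i4
  exact i5 _ _

-- ===== CLAIM (what is proved, stated in full; the proofs are below) =====
def Claim_equal_buying_a_factory : Prop := ∀ (board_size : Int × Int) (turn : Int) (list_color_map : List (List String)) (factory : List (String × Int)) (factory_price : Int) (cash : List (String × Int)) (current_profit : List (String × Int)) (factory_profit : Int) (list_property : List (List String)) (wood : List (String × Int)), Dom_buying_a_factory board_size turn list_color_map factory factory_price cash current_profit factory_profit list_property wood → Pre_buying_a_factory board_size turn list_color_map factory factory_price cash current_profit factory_profit list_property wood → Spec_buying_a_factory board_size turn list_color_map factory factory_price cash current_profit factory_profit list_property wood (buying_a_factory board_size turn list_color_map factory factory_price cash current_profit factory_profit list_property wood)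

-- ===== LEMMAS AND PROOFS =====

-- the board cells in row-major order
def pvCells (H W : Nat) : List (Nat × Nat) :=
  (List.range H).flatMap (fun y => (List.range W).map (fun x => (y, x)))

-- "cell yx is eligible with colour c" (colour read from the given, unmutated map)
def pvPred (lprop lcm : List (List String)) (t c : String) (yx : Nat × Nat) : Bool :=
  ((lprop.getD yx.1 []).getD yx.2 "" == t) && ((lcm.getD yx.1 []).getD yx.2 "" == c)

theorem pvFoldl_flatMap {α β σ : Type} (l : List α) (g : α → List β) (f : σ → β → σ) (i : σ) :
    (l.flatMap g).foldl f i = l.foldl (fun s a => (g a).foldl f s) i := by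
  induction l generalizing i with
  | nil => rfl
  | cons a l ih => simp [List.flatMap_cons, List.foldl_append, ih]

theorem pvNested_eq {σ : Type} (H W : Nat) (f : σ → Nat × Nat → σ) (i : σ) :
    (List.range H).foldl (fun s y => (List.range W).foldl (fun s x => f s (y, x)) s) i
      = (pvCells H W).foldl f i := by
  unfold pvCells
  rw [pvFoldl_flatMap]
  simp [List.foldl_map]

theorem pvStep1_unbought (lprop : List (List String)) (t : String) (fp fprof : Int)
    (cm : List (List String)) (ca pr fa wo : List (String × Int)) (yx : Nat × Nat) :
    pvStep1 lprop t fp fprof (cm, ca, pr, fa, wo, false) yx =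
      if pvPred lprop cm t "0" yx then
        (cm.set yx.1 ((cm.getD yx.1 []).set yx.2 "2"),
         pvDUpd ca t (· - fp), pvDUpd pr t (· + fprof), pvDUpd fa t (· + 1), wo, true)
      else (cm, ca, pr, fa, wo, false) := by
  simp [pvStep1, pvPred]

theorem pvStep2_unbought (lprop : List (List String)) (t : String) (fp fprof : Int)
    (cm : List (List String)) (ca pr fa wo : List (String × Int)) (yx : Nat × Nat) :
    pvStep2 lprop t fp fprof (cm, ca, pr, fa, wo, false) yx =
      if pvPred lprop cm t "1" yx then
        (cm.set yx.1 ((cm.getD yx.1 []).set yx.2 "2"),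
         pvDUpd ca t (· - fp), pvDUpd pr t (· + fprof), pvDUpd fa t (· + 1),
         pvDUpd wo t (· - 1), true)
      else (cm, ca, pr, fa, wo, false) := by
  simp [pvStep2, pvPred]

theorem pvStep1_bought (lprop : List (List String)) (t : String) (fp fprof : Int)
    (L : List (Nat × Nat)) (cm : List (List String)) (ca pr fa wo : List (String × Int)) :
    L.foldl (pvStep1 lprop t fp fprof) (cm, ca, pr, fa, wo, true) = (cm, ca, pr, fa, wo, true) := by
  induction L with
  | nil => rfl
  | cons yx L ih => simp [List.foldl_cons, pvStep1, ih]

theorem pvStep2_bought (lprop : List (List String)) (t : String) (fp fprof : Int)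
    (L : List (Nat × Nat)) (cm : List (List String)) (ca pr fa wo : List (String × Int)) :
    L.foldl (pvStep2 lprop t fp fprof) (cm, ca, pr, fa, wo, true) = (cm, ca, pr, fa, wo, true) := by
  induction L with
  | nil => rfl
  | cons yx L ih => simp [List.foldl_cons, pvStep2, ih]

theorem pvLoop1_char (lprop : List (List String)) (t : String) (fp fprof : Int)
    (L : List (Nat × Nat)) (cm : List (List String)) (ca pr fa wo : List (String × Int)) :
    L.foldl (pvStep1 lprop t fp fprof) (cm, ca, pr, fa, wo, false) =
      match L.find? (pvPred lprop cm t "0") with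
      | none => (cm, ca, pr, fa, wo, false)
      | some yx => (cm.set yx.1 ((cm.getD yx.1 []).set yx.2 "2"),
          pvDUpd ca t (· - fp), pvDUpd pr t (· + fprof), pvDUpd fa t (· + 1), wo, true) := by
  induction L with
  | nil => rfl
  | cons yx L ih =>
      rw [List.foldl_cons, pvStep1_unbought, List.find?_cons]
      by_cases h : pvPred lprop cm t "0" yx = true
      · simp [h, pvStep1_bought]
      · rw [Bool.not_eq_true] at h
        simp [h, ih]

theorem pvLoop2_char (lprop : List (List String)) (t : String) (fp fprof : Int)
    (L : List (Nat × Nat)) (cm : List (List String)) (ca pr fa wo : List (String × Int)) :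
    L.foldl (pvStep2 lprop t fp fprof) (cm, ca, pr, fa, wo, false) =
      match L.find? (pvPred lprop cm t "1") with
      | none => (cm, ca, pr, fa, wo, false)
      | some yx => (cm.set yx.1 ((cm.getD yx.1 []).set yx.2 "2"),
          pvDUpd ca t (· - fp), pvDUpd pr t (· + fprof), pvDUpd fa t (· + 1),
          pvDUpd wo t (· - 1), true) := by
  induction L with
  | nil => rfl
  | cons yx L ih =>
      rw [List.foldl_cons, pvStep2_unbought, List.find?_cons]
      by_cases h : pvPred lprop cm t "1" yx = true
      · simp [h, pvStep2_bought]
      · rw [Bool.not_eq_true] at h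
        simp [h, ih]

theorem pvScanStep_char (lcm lprop : List (List String)) (t : String)
    (zo : Option (Nat × Nat) × Option (Nat × Nat)) (yx : Nat × Nat) :
    pvScanStep lcm lprop t zo yx =
      ((if pvPred lprop lcm t "0" yx && zo.1.isNone then some yx else zo.1),
       (if pvPred lprop lcm t "1" yx && zo.2.isNone then some yx else zo.2)) := by
  obtain ⟨z, o⟩ := zo
  unfold pvScanStep pvPred
  by_cases hp : (lprop.getD yx.1 []).getD yx.2 "" = t
  · by_cases h0 : (lcm.getD yx.1 []).getD yx.2 "" = "0"
    · have h1 : (lcm.getD yx.1 []).getD yx.2 "" ≠ "1" := by rw [h0]; decide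
      cases z <;> simp_all
    · by_cases h1 : (lcm.getD yx.1 []).getD yx.2 "" = "1"
      · cases z <;> cases o <;> simp_all
      · simp_all
  · simp_all

theorem pvScan_char (lcm lprop : List (List String)) (t : String)
    (L : List (Nat × Nat)) (z o : Option (Nat × Nat)) :
    L.foldl (pvScanStep lcm lprop t) (z, o) =
      ((match z with | some p => some p | none => L.find? (pvPred lprop lcm t "0")),
       (match o with | some p => some p | none => L.find? (pvPred lprop lcm t "1"))) := by
  induction L generalizing z o with
  | nil => cases z <;> cases o <;> rfl
  | cons yx L ih =>
      rw [List.foldl_cons, pvScanStep_char, ih]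
      cases z <;> cases o <;>
        by_cases h0 : pvPred lprop lcm t "0" yx = true <;>
          by_cases h1 : pvPred lprop lcm t "1" yx = true <;>
            simp_all

-- ===== VERDICT (by name: the statement is the Claim_ definition above) =====
theorem buying_a_factory_spec : Claim_equal_buying_a_factory := by
  intro board_size turn list_color_map factory factory_price cash current_profit factory_profit list_property wood _ _
  unfold Spec_buying_a_factory buying_a_factory buying_a_factory_alt
  dsimp only
  rw [pvNested_eq, pvNested_eq, pvNested_eq, pvScan_char, pvLoop1_char]
  cases hf0 : (pvCells board_size.2.toNat board_size.1.toNat).find?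
      (pvPred list_property list_color_map (PySem.Int.toStr turn) "0") with
  | some yx => simp
  | none =>
      simp only
      rw [pvLoop2_char]
      cases hf1 : (pvCells board_size.2.toNat board_size.1.toNat).find?
          (pvPred list_property list_color_map (PySem.Int.toStr turn) "1") with
      | some yx => simp
      | none => simp
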